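-- pv_equiv track=rewrite | github.com/bulatusmanov1/Grouping_of_ideas | db.py | _smart_grouping
-- ===== SOURCE A (Python) =====
-- def _smart_grouping(token_lists, threshold=20):
--     def similarity(a, b):
--         set_a, set_b = set(a), set(b)
--         intersection = set_a & set_b
--         union = set_a | set_b
--         return 100 * len(intersection) / len(union) if union else 0.0
--
--     token_lists = [tokens if tokens else ['АРГЕС'] for tokens in token_lists]
--     used = [False] * len(token_lists)
--     groups = []
--
--     for i, tokens in enumerate(token_lists):
--         if used[i]:
--             continue
--         group = [i]
--         used[i] = True
--         for j in range(i + 1, len(token_lists)):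
--             if not used[j] and similarity(tokens, token_lists[j]) >= threshold:
--                 group.append(j)
--                 used[j] = True
--         groups.append(group)
--
--     return groups
-- ===== SOURCE B (Python) =====
-- def _smart_grouping(token_lists, threshold=20):
--     def similarity(a, b):
--         set_a, set_b = set(a), set(b)
--         intersection = set_a & set_b
--         union = set_a | set_b
--         return 100 * len(intersection) / len(union) if union else 0.0
--
--     token_lists = [tokens if tokens else ['АРГЕС'] for tokens in token_lists]
--     groups = []
--     remaining = list(range(len(token_lists)))
--     while remaining:
--         i, rest = remaining[0], remaining[1:]
--         seed = token_lists[i]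
--         matched, non_matched = [], []
--         for j in rest:
--             (matched if similarity(seed, token_lists[j]) >= threshold else non_matched).append(j)
--         groups.append([i] + matched)
--         remaining = non_matched
--     return groups
-- ===== Notes on version B (the rewrite author's own statement) =====
-- stated objective: alternative
-- what changed: Replaces the used-flags boolean array and the skip-if-used double index scan with an iterative partition of a shrinking 'remaining' index list: the head seeds a group and one pass splits the tail into matched and non-matched, so no used-flag bookkeeping or re-visits of consumed indices remain.
import Mathlib
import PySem

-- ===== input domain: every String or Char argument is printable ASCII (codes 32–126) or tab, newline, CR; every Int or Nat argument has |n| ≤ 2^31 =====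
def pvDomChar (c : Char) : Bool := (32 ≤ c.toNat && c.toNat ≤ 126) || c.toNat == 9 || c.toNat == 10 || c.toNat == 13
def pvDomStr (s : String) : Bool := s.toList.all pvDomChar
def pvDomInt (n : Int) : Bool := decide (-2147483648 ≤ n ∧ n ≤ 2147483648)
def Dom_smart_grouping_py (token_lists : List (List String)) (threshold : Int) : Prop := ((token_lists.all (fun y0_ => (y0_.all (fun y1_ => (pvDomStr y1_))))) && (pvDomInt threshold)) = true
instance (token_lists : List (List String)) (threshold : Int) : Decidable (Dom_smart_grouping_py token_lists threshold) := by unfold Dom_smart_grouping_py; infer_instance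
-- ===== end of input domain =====

-- B replaces A's used-flags array and skip-scan with an iterative partition of a shrinking
-- remaining-index list (alternative decomposition, same greedy result).


-- ===== PORT A =====
-- similarity(a, b) >= threshold, shared verbatim by both Pythons. The float comparison
-- 100*|I|/|U| >= t is ported as the exact rational comparison 100*|I| >= t*|U|; these agree
-- whenever |U| < 2^45, i.e. for every list that fits in memory.
def pvSimGe (a b : List String) (t : Int) : Bool :=
  let sa := PySem.Set.ofList a
  let sb := PySem.Set.ofList b
  let inter := PySem.Set.inter sa sb
  let union := PySem.Set.union sa sb
  if union.length = 0 then decide ((0 : Int) ≥ t)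
  else decide (100 * (inter.length : Int) ≥ t * (union.length : Int))

-- A's inner j-loop over range(i+1, n) (= rest of the index list): skip used, else append & mark.
def pvAInner (tls : List (List String)) (t : Int) (tokens : List String)
    (rest : List Nat) (group : List Int) (used : List Bool) : List Int × List Bool :=
  rest.foldl
    (fun st j =>
      if !(st.2.getD j false) && pvSimGe tokens (tls.getD j []) t then
        (st.1 ++ [(j : Int)], st.2.set j true)
      else st)
    (group, used)

-- A's outer i-loop over enumerate(token_lists), as recursion on the index list [i, i+1, …, n-1].
def pvAOuter (tls : List (List String)) (t : Int) : List Nat → List Bool → List (List Int)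
  | [], _ => []
  | i :: rest, used =>
    if used.getD i false then pvAOuter tls t rest used
    else
      let r := pvAInner tls t (tls.getD i []) rest [(i : Int)] (used.set i true)
      r.1 :: pvAOuter tls t rest r.2

def smart_grouping_py (token_lists : List (List String)) (threshold : Int) : List (List Int) :=
  let tls := token_lists.map (fun ts => if ts.isEmpty then ["АРГЕС"] else ts)
  pvAOuter tls threshold (List.range tls.length) (List.replicate tls.length false)

-- ===== PORT B =====
-- B's while-loop: pop the head of `remaining` as seed, partition the tail by similarity.
def pvBLoop (tls : List (List String)) (t : Int) : List Nat → List (List Int)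
  | [] => []
  | i :: rest =>
    let seed := tls.getD i []
    let p := rest.partition (fun j => pvSimGe seed (tls.getD j []) t)
    ((i : Int) :: p.1.map (fun j => (j : Int))) :: pvBLoop tls t p.2
termination_by r => r.length
decreasing_by
  simp only [List.partition_eq_filter_filter]
  exact Nat.lt_succ_of_le (List.length_filter_le _ _)

def smart_grouping_py_alt (token_lists : List (List String)) (threshold : Int) : List (List Int) :=
  let tls := token_lists.map (fun ts => if ts.isEmpty then ["АРГЕС"] else ts)
  pvBLoop tls threshold (List.range tls.length)

-- ===== PRECONDITION & SPEC =====
def Spec_smart_grouping_py (token_lists : List (List String)) (threshold : Int) (out : List (List Int)) : Prop := out = smart_grouping_py_alt token_lists threshold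
instance (token_lists : List (List String)) (threshold : Int) (out : List (List Int)) : Decidable (Spec_smart_grouping_py token_lists threshold out) := by unfold Spec_smart_grouping_py; infer_instance

-- ===== CLAIM (what is proved, stated in full; the proofs are below) =====
def Claim_equal_smart_grouping_py : Prop := ∀ (token_lists : List (List String)) (threshold : Int), Dom_smart_grouping_py token_lists threshold → Spec_smart_grouping_py token_lists threshold (smart_grouping_py token_lists threshold)

-- ===== LEMMAS AND PROOFS =====

lemma pvAInner_snd_length (tls : List (List String)) (t : Int) (tokens : List String) :
    ∀ (rest : List Nat) (group : List Int) (used : List Bool),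
      (pvAInner tls t tokens rest group used).2.length = used.length := by
  intro rest
  induction rest with
  | nil => intro g u; simp [pvAInner]
  | cons j rest ih =>
    intro g u
    unfold pvAInner
    rw [List.foldl_cons]
    by_cases hc : (!(u.getD j false) && pvSimGe tokens (tls.getD j []) t) = true
    · rw [if_pos hc]
      have := ih (g ++ [(j : Int)]) (u.set j true)
      unfold pvAInner at this
      rw [this, List.length_set]
    · rw [if_neg hc]
      have := ih g u
      unfold pvAInner at this
      exact this

lemma pvAInner_fst (tls : List (List String)) (t : Int) (tokens : List String) :
    ∀ (rest : List Nat) (group : List Int) (used : List Bool), rest.Nodup →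
      (pvAInner tls t tokens rest group used).1 =
        group ++ (rest.filter
          (fun j => !(used.getD j false) && pvSimGe tokens (tls.getD j []) t)).map
            (fun j => (j : Int)) := by
  intro rest
  induction rest with
  | nil => intro g u _; simp [pvAInner]
  | cons j rest ih =>
    intro g u hnd
    have hj : j ∉ rest := (List.nodup_cons.mp hnd).1
    have hnd' : rest.Nodup := (List.nodup_cons.mp hnd).2
    unfold pvAInner
    rw [List.foldl_cons, List.filter_cons]
    by_cases hc : (!(u.getD j false) && pvSimGe tokens (tls.getD j []) t) = true
    · rw [if_pos hc, if_pos hc]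
      have := ih (g ++ [(j : Int)]) (u.set j true) hnd'
      unfold pvAInner at this
      rw [this]
      have hfe : rest.filter
          (fun k => !((u.set j true).getD k false) && pvSimGe tokens (tls.getD k []) t)
          = rest.filter (fun k => !(u.getD k false) && pvSimGe tokens (tls.getD k []) t) := by
        apply List.filter_congr
        intro k hk
        have hkj : k ≠ j := fun h => hj (h ▸ hk)
        have : (u.set j true).getD k false = u.getD k false := by
          simp [List.getD, List.getElem?_set_ne (Ne.symm hkj)]
        rw [this]
      rw [hfe]
      simp
    · rw [if_neg hc, if_neg hc]
      have := ih g u hnd'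
      unfold pvAInner at this
      exact this

lemma pvAInner_snd_getD (tls : List (List String)) (t : Int) (tokens : List String) :
    ∀ (rest : List Nat) (group : List Int) (used : List Bool), rest.Nodup →
      (∀ j ∈ rest, j < used.length) →
      ∀ k, (pvAInner tls t tokens rest group used).2.getD k false =
        (used.getD k false ||
          (decide (k ∈ rest) && !(used.getD k false) && pvSimGe tokens (tls.getD k []) t)) := by
  intro rest
  induction rest with
  | nil => intro g u _ _ k; simp [pvAInner]
  | cons j rest ih =>
    intro g u hnd hlt k
    have hj : j ∉ rest := (List.nodup_cons.mp hnd).1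
    have hnd' : rest.Nodup := (List.nodup_cons.mp hnd).2
    have hjlt : j < u.length := hlt j (List.mem_cons_self ..)
    unfold pvAInner
    rw [List.foldl_cons]
    by_cases hc : (!(u.getD j false) && pvSimGe tokens (tls.getD j []) t) = true
    · rw [if_pos hc]
      have hlt' : ∀ x ∈ rest, x < (u.set j true).length := by
        intro x hx; simpa using hlt x (List.mem_cons_of_mem _ hx)
      have hrec := ih (g ++ [(j : Int)]) (u.set j true) hnd' hlt' k
      unfold pvAInner at hrec
      rw [hrec]
      by_cases hkj : k = j
      · subst hkj
        have h1 : (u.set k true).getD k false = true := by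
          simp [List.getD, hjlt]
        have h2 : k ∉ rest := hj
        rcases (Bool.and_eq_true _ _).mp hc with ⟨hu', hs⟩
        have hu : u.getD k false = false := by simpa using hu'
        simp only [List.getD] at h1 hu hs
        simp [h1, h2, hu, hs, List.mem_cons]
      · have h1 : (u.set j true).getD k false = u.getD k false := by
          simp [List.getD, List.getElem?_set_ne (Ne.symm hkj)]
        rw [h1]
        simp [List.mem_cons, hkj]
    · rw [if_neg hc]
      have hlt' : ∀ x ∈ rest, x < u.length := fun x hx => hlt x (List.mem_cons_of_mem _ hx)
      have hrec := ih g u hnd' hlt' k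
      unfold pvAInner at hrec
      rw [hrec]
      by_cases hkj : k = j
      · subst hkj
        have h2 : k ∉ rest := hj
        by_cases hu : u.getD k false = true
        · simp only [List.getD] at hu
          simp [hu]
        · simp only [Bool.not_eq_true] at hu
          have hs : pvSimGe tokens (tls.getD k []) t = false := by
            by_contra h
            simp only [Bool.not_eq_false] at h
            exact hc (by rw [hu, h]; rfl)
          simp only [List.getD] at hu hs
          simp [hu, hs, h2]
      · simp [List.mem_cons, hkj]

lemma pvKey (tls : List (List String)) (t : Int) :
    ∀ (pending : List Nat) (used : List Bool), pending.Nodup →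
      (∀ j ∈ pending, j < used.length) →
      pvAOuter tls t pending used =
        pvBLoop tls t (pending.filter (fun k => !(used.getD k false))) := by
  intro pending
  induction pending with
  | nil => intro used _ _; simp [pvAOuter, pvBLoop]
  | cons i rest ih =>
    intro used hnd hlt
    have hi : i ∉ rest := (List.nodup_cons.mp hnd).1
    have hnd' : rest.Nodup := (List.nodup_cons.mp hnd).2
    have hilt : i < used.length := hlt i (List.mem_cons_self ..)
    have hlt' : ∀ x ∈ rest, x < used.length := fun x hx => hlt x (List.mem_cons_of_mem _ hx)
    by_cases hu : used.getD i false = true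
    · rw [pvAOuter, if_pos hu, List.filter_cons_of_neg (by simp [List.getD] at hu ⊢; simp [hu])]
      exact ih used hnd' hlt'
    · simp only [Bool.not_eq_true] at hu
      rw [pvAOuter, if_neg (by simp only [List.getD] at hu; simp [hu]), List.filter_cons_of_pos (by simp [List.getD] at hu ⊢; simp [hu]), pvBLoop]
      simp only [List.partition_eq_filter_filter, Function.comp_def]
      have hset : ∀ k ∈ rest, (used.set i true).getD k false = used.getD k false := by
        intro k hk
        have hki : k ≠ i := fun h => hi (h ▸ hk)
        simp [List.getD, List.getElem?_set_ne (Ne.symm hki)]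
      have hltset : ∀ x ∈ rest, x < (used.set i true).length := by
        intro x hx; simpa using hlt' x hx
      congr 1
      · -- heads agree
        rw [pvAInner_fst tls t _ rest _ _ hnd']
        have : rest.filter
            (fun j => !((used.set i true).getD j false) && pvSimGe (tls.getD i []) (tls.getD j []) t)
            = (rest.filter (fun k => !(used.getD k false))).filter
                (fun j => pvSimGe (tls.getD i []) (tls.getD j []) t) := by
          rw [List.filter_filter]
          apply List.filter_congr
          intro k hk
          rw [hset k hk]
          cases used.getD k false <;> cases pvSimGe (tls.getD i []) (tls.getD k []) t <;> rfl
        rw [this]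
        simp
      · -- tails agree
        rw [ih _ hnd' (by rw [pvAInner_snd_length]; exact hltset)]
        congr 1
        have hneg : (rest.filter (fun k => !(used.getD k false))).filter
              (fun j => !pvSimGe (tls.getD i []) (tls.getD j []) t)
            = rest.filter (fun k =>
                !(used.getD k false) && !pvSimGe (tls.getD i []) (tls.getD k []) t) := by
          rw [List.filter_filter]
          apply List.filter_congr
          intro k _
          cases used.getD k false <;> cases pvSimGe (tls.getD i []) (tls.getD k []) t <;> rfl
        rw [hneg]
        apply List.filter_congr
        intro k hk
        rw [pvAInner_snd_getD tls t _ rest _ _ hnd' hltset k]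
        rw [hset k hk]
        have hk' : decide (k ∈ rest) = true := by simp [hk]
        rw [hk']
        cases used.getD k false <;> cases pvSimGe (tls.getD i []) (tls.getD k []) t <;> rfl

-- ===== VERDICT (by name: the statement is the Claim_ definition above) =====
theorem smart_grouping_py_spec : Claim_equal_smart_grouping_py := by
  intro token_lists threshold _
  unfold Spec_smart_grouping_py smart_grouping_py smart_grouping_py_alt
  set tls := token_lists.map (fun ts => if ts.isEmpty then ["АРГЕС"] else ts) with htls
  have h := pvKey tls threshold (List.range tls.length) (List.replicate tls.length false)
    (List.nodup_range) (by intro j hj; simpa using List.mem_range.mp hj)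
  rw [h]
  congr 1
  apply List.filter_eq_self.mpr
  intro k _
  simp [List.getD, List.getElem?_replicate]
  split <;> rfl
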